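-- pv_equiv track=rewrite | github.com/sharma-anubhav/CrackingTheCodingInterview-DSA | ch36(Graphs)/Grids/3. ShortestPath(Weight)/*3.0.py | shoot_obstacle
-- ===== SOURCE A (Python) =====
-- from heapq import heappop, heappush
--
-- def is_valid(grid, loc):
--     cur_r, cur_c = loc
--     r, c = len(grid), len(grid[0])
--     if 0<=cur_r<r and 0<=cur_c<c:
--         return True
--     return False
--
-- def get_nbr(node):
--     cur_r, cur_c = node[0], node[1]
--     directions = [(1,0), (0,1), (-1,0), (0,-1)]
--     for direction in directions:
--         yield (cur_r+direction[0], cur_c+direction[1])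
--
-- def shoot_obstacle(grid, k):
--     s, e = (0,0), (len(grid)-1, len(grid[0])-1)
--     distance = {(s, 0): grid[s[0]][s[1]]}
--     pq = []
--     heappush(pq, (grid[s[0]][s[1]], s, 0))
--     visited = set()
--
--     while pq:
--         cost, node, destroyed = heappop(pq)
--         if (node, destroyed) in visited:
--             continue
--         visited.add((node, destroyed))
--         distance[(node, destroyed)] = cost
--
--         if node == e:
--             return cost
--
--         for nbr in get_nbr(node):
--             if not is_valid(grid, nbr):
--                 continue
--             new_cost = cost+grid[nbr[0]][nbr[1]]
--             if grid[nbr[0]][nbr[1]] == 1: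
--                 if destroyed<k and (nbr, destroyed+1) not in visited and new_cost < distance.get((nbr, destroyed+1), float("inf")):
--                     distance[(nbr, destroyed+1)] = new_cost
--                     heappush(pq,(new_cost, nbr, destroyed+1))
--             else:
--                 if (nbr, destroyed) not in visited and new_cost < distance.get((nbr, destroyed), float("inf")):
--                     distance[(nbr, destroyed)] = new_cost
--                     heappush(pq,(new_cost, nbr, destroyed))
--     return -1
-- ===== SOURCE B (Python) =====
-- def shoot_obstacle(grid, k):
--     # queue-free Dijkstra over (cell, destroyed) states: repeatedly scan the
--     # tentative-distance table for the minimal unsettled state (no heap, no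
--     # duplicate entries, no lazy deletion).
--     rows, cols = len(grid), len(grid[0])
--     end = (rows - 1, cols - 1)
--     dist = {((0, 0), 0): grid[0][0]}
--     settled = set()
--     while True:
--         best = None
--         for (node, destroyed), c in dist.items():
--             if (node, destroyed) in settled:
--                 continue
--             cand = (c, node, destroyed)
--             if best is None or cand < best:
--                 best = cand
--         if best is None:
--             return -1
--         cost, node, destroyed = best
--         settled.add((node, destroyed))
--         if node == end:
--             return cost
--         r, c = node
--         for nr, nc in ((r + 1, c), (r, c + 1), (r - 1, c), (r, c - 1)):
--             if not (0 <= nr < rows and 0 <= nc < cols):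
--                 continue
--             w = grid[nr][nc]
--             nd = destroyed + 1 if w == 1 else destroyed
--             if w == 1 and not destroyed < k:
--                 continue
--             key = ((nr, nc), nd)
--             if key in settled:
--                 continue
--             ncost = cost + w
--             if ncost < dist.get(key, float("inf")):
--                 dist[key] = ncost
-- ===== Notes on version B (the rewrite author's own statement) =====
-- stated objective: alternative
-- what changed: Replaces the heapq-based Dijkstra with lazy deletion by a queue-free Dijkstra that keeps only the tentative-distance table and a settled set and each round scans the table for the minimal unsettled (cost, node, destroyed) state.
-- outside the precondition, e.g. on shoot_obstacle([[0, 1], [1], [9, 0]], 0): A returns -1, B returns -1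
import Mathlib
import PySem

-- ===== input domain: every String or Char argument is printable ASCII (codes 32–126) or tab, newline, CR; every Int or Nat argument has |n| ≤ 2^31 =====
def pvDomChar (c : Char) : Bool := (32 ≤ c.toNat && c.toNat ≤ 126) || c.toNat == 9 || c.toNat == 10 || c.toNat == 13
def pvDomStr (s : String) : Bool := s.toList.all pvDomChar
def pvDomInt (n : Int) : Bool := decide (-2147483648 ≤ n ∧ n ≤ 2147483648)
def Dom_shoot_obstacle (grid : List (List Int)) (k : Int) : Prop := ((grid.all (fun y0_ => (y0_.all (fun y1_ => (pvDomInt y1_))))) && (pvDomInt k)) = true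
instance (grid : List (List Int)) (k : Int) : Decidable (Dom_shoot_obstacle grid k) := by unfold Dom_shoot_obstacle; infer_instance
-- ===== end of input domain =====

-- B replaces A's heapq Dijkstra (lazy deletion) by a queue-free Dijkstra that scans the
-- tentative-distance table for the minimal unsettled state each round; same results, similar cost.


-- state key = (node, destroyed) with node = (row, col); heap entry = (cost, key),
-- ordered exactly like Python's (cost, node, destroyed) tuples (lexicographically)
abbrev PKey : Type := (Int × Int) × Int
abbrev PEntry : Type := Int × PKey

-- Python tuple comparison (cost, node, destroyed) <= ... , lexicographic
def eLe (a b : PEntry) : Bool :=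
  if a.1 < b.1 then true
  else if b.1 < a.1 then false
  else if a.2.1.1 < b.2.1.1 then true
  else if b.2.1.1 < a.2.1.1 then false
  else if a.2.1.2 < b.2.1.2 then true
  else if b.2.1.2 < a.2.1.2 then false
  else decide (a.2.2 ≤ b.2.2)

-- Python tuple comparison, strict
def eLt (a b : PEntry) : Bool :=
  if a.1 < b.1 then true
  else if b.1 < a.1 then false
  else if a.2.1.1 < b.2.1.1 then true
  else if b.2.1.1 < a.2.1.1 then false
  else if a.2.1.2 < b.2.1.2 then true
  else if b.2.1.2 < a.2.1.2 then false
  else decide (a.2.2 < b.2.2)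

-- grid[r][c] (indices are in range whenever the Python evaluates it under Pre_)
def pvCell (grid : List (List Int)) (r c : Int) : Int :=
  (PySem.List.pyGet? ((PySem.List.pyGet? grid r).getD []) c).getD 0

-- x < dist.get(key, float("inf"))
def pvLtGetInf (x : Int) (o : Option Int) : Bool :=
  match o with
  | some d => decide (x < d)
  | none => true

-- ===== PORT A =====
-- port of is_valid
def pvIsValid (grid : List (List Int)) (loc : Int × Int) : Bool :=
  decide (0 ≤ loc.1 ∧ loc.1 < (grid.length : Int) ∧ 0 ≤ loc.2 ∧ loc.2 < ((grid.headI).length : Int))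

-- port of get_nbr (the four directions, in order)
def pvNbrs (node : Int × Int) : List (Int × Int) :=
  [(node.1 + 1, node.2), (node.1, node.2 + 1), (node.1 - 1, node.2), (node.1, node.2 - 1)]

-- heappop's extract-min: the minimal entry of the heap (heapq is ported by its
-- extract-min contract: pop returns the tuple-minimal element, push adds one)
def pvMinE (h : PEntry) (t : List PEntry) : PEntry :=
  t.foldl (fun m x => if eLe m x then m else x) h

-- body of A's `for nbr in get_nbr(node)` loop; state = (pq, distance)
def pvRelaxA (grid : List (List Int)) (k cost destroyed : Int) (visited : PySem.Set PKey)
    (st : List PEntry × PySem.Dict PKey Int) (nbr : Int × Int) :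
    List PEntry × PySem.Dict PKey Int :=
  if pvIsValid grid nbr then
    let w := pvCell grid nbr.1 nbr.2
    let newCost := cost + w
    if w = 1 then
      if decide (destroyed < k) && !(PySem.Set.contains visited (nbr, destroyed + 1)) &&
          pvLtGetInf newCost (st.2.get? (nbr, destroyed + 1)) then
        (st.1 ++ [(newCost, (nbr, destroyed + 1))], st.2.insert (nbr, destroyed + 1) newCost)
      else st
    else
      if !(PySem.Set.contains visited (nbr, destroyed)) &&
          pvLtGetInf newCost (st.2.get? (nbr, destroyed)) then
        (st.1 ++ [(newCost, (nbr, destroyed))], st.2.insert (nbr, destroyed) newCost)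
      else st
  else st

-- A's `while pq:` loop (fuel only makes the recursion structural; it is provably never exhausted)
def pvLoopA (grid : List (List Int)) (k : Int) (e : Int × Int) :
    Nat → List PEntry → PySem.Set PKey → PySem.Dict PKey Int → Int
  | 0, _, _, _ => -1
  | _ + 1, [], _, _ => -1
  | fuel + 1, h :: t, visited, dist =>
    let m := pvMinE h t
    let pq' := (h :: t).erase m
    if PySem.Set.contains visited m.2 then pvLoopA grid k e fuel pq' visited dist
    else
      let visited' := PySem.Set.add visited m.2
      let dist' := dist.insert m.2 m.1
      if m.2.1 = e then m.1
      else
        let st := (pvNbrs m.2.1).foldl (pvRelaxA grid k m.1 m.2.2 visited') (pq', dist')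
        pvLoopA grid k e fuel st.1 visited' st.2

def shoot_obstacle (grid : List (List Int)) (k : Int) : Int :=
  let s : Int × Int := (0, 0)
  let e : Int × Int := ((grid.length : Int) - 1, ((grid.headI).length : Int) - 1)
  let g0 := pvCell grid 0 0
  let dist : PySem.Dict PKey Int := PySem.Dict.ofList [((s, 0), g0)]
  let pq : List PEntry := [(g0, (s, (0 : Int)))]
  pvLoopA grid k e (5 * (grid.length * (grid.headI).length * (k.toNat + 1)) + 2) pq
    PySem.Set.empty dist

-- ===== PORT B =====
-- body of B's `for ..., c in dist.items()` min-scan: keep the best unsettled candidate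
def pvBestStep (settled : PySem.Set PKey) (best : Option PEntry) (kv : PKey × Int) :
    Option PEntry :=
  if PySem.Set.contains settled kv.1 then best
  else
    match best with
    | none => some (kv.2, kv.1)
    | some b => if eLt (kv.2, kv.1) b then some (kv.2, kv.1) else best

-- body of B's neighbour loop; state = dist
def pvRelaxB (grid : List (List Int)) (k cost destroyed : Int) (settled : PySem.Set PKey)
    (dist : PySem.Dict PKey Int) (nbr : Int × Int) : PySem.Dict PKey Int :=
  if !decide (0 ≤ nbr.1 ∧ nbr.1 < (grid.length : Int) ∧ 0 ≤ nbr.2 ∧ nbr.2 < ((grid.headI).length : Int)) then dist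
  else
    let w := pvCell grid nbr.1 nbr.2
    let nd := if w = 1 then destroyed + 1 else destroyed
    if w = 1 && !decide (destroyed < k) then dist
    else if PySem.Set.contains settled (nbr, nd) then dist
    else
      let ncost := cost + w
      if pvLtGetInf ncost (dist.get? (nbr, nd)) then dist.insert (nbr, nd) ncost else dist

-- B's `while True:` loop (fuel only makes the recursion structural)
def pvLoopB (grid : List (List Int)) (k : Int) (e : Int × Int) :
    Nat → PySem.Dict PKey Int → PySem.Set PKey → Int
  | 0, _, _ => -1
  | fuel + 1, dist, settled =>
    match dist.items.foldl (pvBestStep settled) none with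
    | none => -1
    | some best =>
      let settled' := PySem.Set.add settled best.2
      if best.2.1 = e then best.1
      else
        pvLoopB grid k e fuel
          ([(best.2.1.1 + 1, best.2.1.2), (best.2.1.1, best.2.1.2 + 1),
            (best.2.1.1 - 1, best.2.1.2), (best.2.1.1, best.2.1.2 - 1)].foldl
            (pvRelaxB grid k best.1 best.2.2 settled') dist) settled'

def shoot_obstacle_alt (grid : List (List Int)) (k : Int) : Int :=
  let e : Int × Int := ((grid.length : Int) - 1, ((grid.headI).length : Int) - 1)
  let dist : PySem.Dict PKey Int :=
    PySem.Dict.ofList [(((((0 : Int), (0 : Int))), (0 : Int)), pvCell grid 0 0)]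
  pvLoopB grid k e (grid.length * (grid.headI).length * (k.toNat + 1) + 1) dist PySem.Set.empty

-- ===== PRECONDITION & SPEC =====
-- Pre_ excludes the empty grid, grids whose first row is empty, and grids with a row shorter
-- than row 0: A indexes grid[0][0] and grid[r][c] for all c < len(grid[0]) next to reached
-- cells and raises IndexError on essentially all of these (a few ragged grids whose short
-- rows are never reached still return and are excluded with them).
def Pre_shoot_obstacle (grid : List (List Int)) (k : Int) : Prop :=
  grid ≠ [] ∧ 0 < (grid.headI).length ∧ ∀ row ∈ grid, (grid.headI).length ≤ row.length

instance (grid : List (List Int)) (k : Int) : Decidable (Pre_shoot_obstacle grid k) := by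
  unfold Pre_shoot_obstacle; infer_instance

def pvWitness_shoot_obstacle : List (List Int) × Int := ([[0, 1], [1, 0]], 1)

def Spec_shoot_obstacle (grid : List (List Int)) (k : Int) (out : Int) : Prop := out = shoot_obstacle_alt grid k
instance (grid : List (List Int)) (k : Int) (out : Int) : Decidable (Spec_shoot_obstacle grid k out) := by unfold Spec_shoot_obstacle; infer_instance

-- ===== CLAIM (what is proved, stated in full; the proofs are below) =====
def Claim_equal_shoot_obstacle : Prop := ∀ (grid : List (List Int)) (k : Int), Dom_shoot_obstacle grid k → Pre_shoot_obstacle grid k → Spec_shoot_obstacle grid k (shoot_obstacle grid k)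

-- ===== LEMMAS AND PROOFS =====

-- the finite state space: all ((r, c), destroyed) with r, c in range and 0 <= destroyed <= max k 0
noncomputable def pvS (grid : List (List Int)) (k : Int) : Finset PKey :=
  ((Finset.Icc 0 ((grid.length : Int) - 1)) ×ˢ (Finset.Icc 0 (((grid.headI).length : Int) - 1)))
    ×ˢ (Finset.Icc 0 (if k < 0 then 0 else k))

-- number of not-yet-settled states
noncomputable def pvU (grid : List (List Int)) (k : Int) (visited : PySem.Set PKey) : Nat :=
  ((pvS grid k).filter (fun x => x ∉ visited)).card

-- the simulation invariant tying A's heap to the shared distance table / visited set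
def pvInv (grid : List (List Int)) (k : Int) (pq : List PEntry) (visited : PySem.Set PKey)
    (dist : PySem.Dict PKey Int) : Prop :=
  (∀ en ∈ pq, en.2 ∈ pvS grid k) ∧
  (∀ en ∈ pq, en.2 ∉ visited → ∃ d, dist.get? en.2 = some d ∧ d ≤ en.1) ∧
  (∀ key d, key ∉ visited → dist.get? key = some d → (d, key) ∈ pq) ∧
  dist.keys.Nodup ∧ visited.Nodup

lemma eLe_iff (a b : PEntry) : eLe a b = true ↔
    (a.1 < b.1 ∨ (a.1 = b.1 ∧ (a.2.1.1 < b.2.1.1 ∨ (a.2.1.1 = b.2.1.1 ∧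
      (a.2.1.2 < b.2.1.2 ∨ (a.2.1.2 = b.2.1.2 ∧ a.2.2 ≤ b.2.2)))))) := by
  simp only [eLe]; split_ifs <;> simp <;> omega

lemma eLt_iff (a b : PEntry) : eLt a b = true ↔
    (a.1 < b.1 ∨ (a.1 = b.1 ∧ (a.2.1.1 < b.2.1.1 ∨ (a.2.1.1 = b.2.1.1 ∧
      (a.2.1.2 < b.2.1.2 ∨ (a.2.1.2 = b.2.1.2 ∧ a.2.2 < b.2.2)))))) := by
  simp only [eLt]; split_ifs <;> simp <;> omega

lemma eLe_refl (a : PEntry) : eLe a a = true := by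
  rw [eLe_iff]; omega

lemma eLe_total (a b : PEntry) : eLe a b = true ∨ eLe b a = true := by
  simp only [eLe_iff]; omega

lemma eLe_trans {a b c : PEntry} (h1 : eLe a b = true) (h2 : eLe b c = true) :
    eLe a c = true := by
  rw [eLe_iff] at h1 h2 ⊢; omega

lemma eLe_antisymm {a b : PEntry} (h1 : eLe a b = true) (h2 : eLe b a = true) : a = b := by
  rcases a with ⟨a1, ⟨a2, a3⟩, a4⟩; rcases b with ⟨b1, ⟨b2, b3⟩, b4⟩
  simp only [eLe_iff] at h1 h2; simp only [Prod.mk.injEq]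
  omega

lemma eLe_of_eLt {a b : PEntry} (h : eLt a b = true) : eLe a b = true := by
  rw [eLt_iff] at h; rw [eLe_iff]; omega

lemma eLt_eq_not_eLe (a b : PEntry) : eLt a b = !eLe b a := by
  cases heq : eLe b a with
  | false =>
    have h' : ¬ (b.1 < a.1 ∨ (b.1 = a.1 ∧ (b.2.1.1 < a.2.1.1 ∨ (b.2.1.1 = a.2.1.1 ∧
        (b.2.1.2 < a.2.1.2 ∨ (b.2.1.2 = a.2.1.2 ∧ b.2.2 ≤ a.2.2)))))) := by
      rw [← eLe_iff b a]; simp [heq]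
    have h2 : eLt a b = true := by rw [eLt_iff]; omega
    simp [h2]
  | true =>
    have h' := (eLe_iff b a).mp heq
    have h2 : eLt a b = false := by
      cases h3 : eLt a b
      · rfl
      · exfalso; rw [eLt_iff] at h3; omega
    simp [h2]

lemma eLe_same_key {c d : Int} {key : PKey} (h : eLe (c, key) (d, key) = true) : c ≤ d := by
  rw [eLe_iff] at h; omega

lemma pvMinE_mem (h : PEntry) (t : List PEntry) : pvMinE h t ∈ h :: t := by
  induction t generalizing h with
  | nil => simp [pvMinE]
  | cons x t ih =>
    have hstep : pvMinE h (x :: t) = pvMinE (if eLe h x then h else x) t := rfl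
    rw [hstep]
    rcases List.mem_cons.mp (ih (if eLe h x then h else x)) with h1 | h1
    · rw [h1]; split_ifs <;> simp
    · simp [h1]

lemma pvMinE_min (h : PEntry) (t : List PEntry) : ∀ x ∈ h :: t, eLe (pvMinE h t) x = true := by
  induction t generalizing h with
  | nil =>
    intro y hy; simp only [List.mem_singleton] at hy; subst hy
    simpa [pvMinE] using eLe_refl y
  | cons x t ih =>
    intro y hy
    have hstep : pvMinE h (x :: t) = pvMinE (if eLe h x then h else x) t := rfl
    have hle1 : eLe (if eLe h x then h else x) h = true := by
      by_cases hx : eLe h x = true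
      · simpa [hx] using eLe_refl h
      · have := (eLe_total h x).resolve_left hx
        simpa [hx] using this
    have hle2 : eLe (if eLe h x then h else x) x = true := by
      by_cases hx : eLe h x = true
      · simpa [hx] using hx
      · simpa [hx] using eLe_refl x
    have hhead : eLe (pvMinE (if eLe h x then h else x) t) (if eLe h x then h else x) = true :=
      ih _ _ List.mem_cons_self
    rw [hstep]
    rcases List.mem_cons.mp hy with rfl | hy'
    · exact eLe_trans hhead hle1
    rcases List.mem_cons.mp hy' with rfl | hy''
    · exact eLe_trans hhead hle2
    · exact ih _ _ (List.mem_cons_of_mem _ hy'')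

-- the unsettled candidates of the table, in scan order
def pvCands (settled : PySem.Set PKey) (items : List (PKey × Int)) : List PEntry :=
  (items.filter (fun kv => !PySem.Set.contains settled kv.1)).map (fun kv => (kv.2, kv.1))

lemma mem_pvCands {settled : PySem.Set PKey} {items : List (PKey × Int)} {x : PEntry} :
    x ∈ pvCands settled items ↔
      ((x.2, x.1) ∈ items ∧ PySem.Set.contains settled x.2 = false) := by
  rcases x with ⟨c, key⟩
  constructor
  · intro hx
    simp only [pvCands, List.mem_map] at hx
    obtain ⟨kv, hkv, heq⟩ := hx
    rcases kv with ⟨kk, vv⟩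
    simp only [Prod.mk.injEq] at heq
    obtain ⟨rfl, rfl⟩ := heq
    obtain ⟨hmem, hpred⟩ := List.mem_filter.mp hkv
    refine ⟨hmem, ?_⟩
    have hnm : kk ∉ settled := by simpa using hpred
    cases hcc : PySem.Set.contains settled kk
    · rfl
    · exact absurd ((PySem.Set.contains_iff settled kk).mp hcc) hnm
  · rintro ⟨hm, hc⟩
    have hnm : key ∉ settled := by
      intro hh
      rw [(PySem.Set.contains_iff settled key).mpr hh] at hc
      cases hc
    simp only [pvCands, List.mem_map]
    exact ⟨(key, c), List.mem_filter.mpr ⟨hm, by simpa using hnm⟩, rfl⟩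

lemma pvBest_go (settled : PySem.Set PKey) :
    ∀ (items : List (PKey × Int)) (acc : Option PEntry),
      (items.foldl (pvBestStep settled) acc = none →
        acc = none ∧ pvCands settled items = []) ∧
      (∀ b, items.foldl (pvBestStep settled) acc = some b →
        (∀ x ∈ pvCands settled items, eLe b x = true) ∧
        (∀ a, acc = some a → eLe b a = true) ∧
        (acc = some b ∨ b ∈ pvCands settled items)) := by
  intro items
  induction items with
  | nil =>
    intro acc
    refine ⟨fun h => ⟨h, rfl⟩, fun b h => ?_⟩
    simp only [List.foldl_nil] at h
    exact ⟨by simp [pvCands], fun a ha => by rw [h] at ha; cases ha; exact eLe_refl b, Or.inl h⟩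
  | cons kv rest ih =>
    intro acc
    by_cases hs : PySem.Set.contains settled kv.1 = true
    · have hm : kv.1 ∈ settled := (PySem.Set.contains_iff settled kv.1).mp hs
      have hstep : (kv :: rest).foldl (pvBestStep settled) acc
          = rest.foldl (pvBestStep settled) acc := by
        simp [List.foldl_cons, pvBestStep, hm]
      have hc : pvCands settled (kv :: rest) = pvCands settled rest := by
        simp [pvCands, List.filter_cons, hm]
      rw [hstep, hc]
      exact ih acc
    · have hnm : kv.1 ∉ settled := fun hh => hs ((PySem.Set.contains_iff settled kv.1).mpr hh)
      have hc : pvCands settled (kv :: rest)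
          = (kv.2, kv.1) :: pvCands settled rest := by
        simp [pvCands, List.filter_cons, hnm]
      rw [hc]
      cases acc with
      | none =>
        have hstep : (kv :: rest).foldl (pvBestStep settled) none
            = rest.foldl (pvBestStep settled) (some (kv.2, kv.1)) := by
          simp [List.foldl_cons, pvBestStep, hnm]
        rw [hstep]
        refine ⟨fun h => absurd ((ih (some (kv.2, kv.1))).1 h).1 (by simp), fun b h => ?_⟩
        obtain ⟨hall, hacc, hmem⟩ := (ih (some (kv.2, kv.1))).2 b h
        have hb : eLe b (kv.2, kv.1) = true := hacc _ rfl
        refine ⟨?_, ?_, ?_⟩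
        · intro x hx
          rcases List.mem_cons.mp hx with rfl | hx'
          · exact hb
          · exact hall x hx'
        · intro a ha; cases ha
        · rcases hmem with h1 | h1
          · cases h1; exact Or.inr List.mem_cons_self
          · exact Or.inr (List.mem_cons_of_mem _ h1)
      | some a0 =>
        by_cases hlt : eLt (kv.2, kv.1) a0 = true
        · have hstep : (kv :: rest).foldl (pvBestStep settled) (some a0)
              = rest.foldl (pvBestStep settled) (some (kv.2, kv.1)) := by
            simp [List.foldl_cons, pvBestStep, hnm, hlt]
          rw [hstep]
          refine ⟨fun h => absurd ((ih _).1 h).1 (by simp), fun b h => ?_⟩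
          obtain ⟨hall, hacc, hmem⟩ := (ih (some (kv.2, kv.1))).2 b h
          have hb : eLe b (kv.2, kv.1) = true := hacc _ rfl
          refine ⟨?_, ?_, ?_⟩
          · intro x hx
            rcases List.mem_cons.mp hx with rfl | hx'
            · exact hb
            · exact hall x hx'
          · intro a ha; cases ha
            exact eLe_trans hb (eLe_of_eLt hlt)
          · rcases hmem with h1 | h1
            · cases h1; exact Or.inr List.mem_cons_self
            · exact Or.inr (List.mem_cons_of_mem _ h1)
        · have hlt' : eLt (kv.2, kv.1) a0 = false := by
            cases h : eLt (kv.2, kv.1) a0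
            · rfl
            · exact absurd h hlt
          have hstep : (kv :: rest).foldl (pvBestStep settled) (some a0)
              = rest.foldl (pvBestStep settled) (some a0) := by
            simp [List.foldl_cons, pvBestStep, hnm, hlt']
          rw [hstep]
          refine ⟨fun h => absurd ((ih _).1 h).1 (by simp), fun b h => ?_⟩
          obtain ⟨hall, hacc, hmem⟩ := (ih (some a0)).2 b h
          have hba : eLe b a0 = true := hacc _ rfl
          have hka : eLe a0 (kv.2, kv.1) = true := by
            have hnn := eLt_eq_not_eLe (kv.2, kv.1) a0
            rw [hlt'] at hnn
            cases h2 : eLe a0 (kv.2, kv.1)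
            · rw [h2] at hnn; simp at hnn
            · rfl
          refine ⟨?_, ?_, ?_⟩
          · intro x hx
            rcases List.mem_cons.mp hx with rfl | hx'
            · exact eLe_trans hba hka
            · exact hall x hx'
          · intro a ha; cases ha; exact hba
          · rcases hmem with h1 | h1
            · exact Or.inl h1
            · exact Or.inr (List.mem_cons_of_mem _ h1)

-- inserting the value a key already has changes nothing
lemma pvInsert_same {dist : PySem.Dict PKey Int} {key : PKey} {v : Int}
    (hnd : dist.keys.Nodup) (h : dist.get? key = some v) : dist.insert key v = dist := by
  have hc : dist.contains key = true := by
    rw [PySem.Dict.contains_eq_isSome_get?, h]; rfl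
  apply PySem.Dict.ext
  rw [PySem.Dict.items_insert_of_contains dist v hc]
  have hid : ∀ p ∈ dist.items, (fun p => if (p.1 == key) = true then (key, v) else p) p = p := by
    intro p hp
    rcases p with ⟨p1, p2⟩
    by_cases hpk : p1 = key
    · subst hpk
      have h2 : dist.get? p1 = some p2 := PySem.Dict.get?_of_mem_items dist hp hnd
      rw [h] at h2
      have hv : v = p2 := Option.some.inj h2
      simp [hv]
    · simp [hpk]
  rw [List.map_congr_left hid]
  simp

lemma pvCard_S (grid : List (List Int)) (k : Int) :
    (pvS grid k).card = grid.length * (grid.headI).length * (k.toNat + 1) := by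
  unfold pvS
  rw [Finset.card_product, Finset.card_product, Int.card_Icc, Int.card_Icc, Int.card_Icc]
  have h1 : ((grid.length : Int) - 1 + 1 - 0).toNat = grid.length := by omega
  have h2 : (((grid.headI).length : Int) - 1 + 1 - 0).toNat = (grid.headI).length := by omega
  have h3 : ((if k < 0 then 0 else k) + 1 - 0).toNat = k.toNat + 1 := by split_ifs <;> omega
  rw [h1, h2, h3]

lemma pvU_add (grid : List (List Int)) (k : Int) {visited : PySem.Set PKey} {key : PKey}
    (hS : key ∈ pvS grid k) (hnv : key ∉ visited) :
    pvU grid k (PySem.Set.add visited key) + 1 = pvU grid k visited ∧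
      1 ≤ pvU grid k visited := by
  have hmem : key ∈ (pvS grid k).filter (fun x => x ∉ visited) :=
    Finset.mem_filter.mpr ⟨hS, hnv⟩
  have hset : (pvS grid k).filter (fun x => x ∉ PySem.Set.add visited key)
      = ((pvS grid k).filter (fun x => x ∉ visited)).erase key := by
    ext x
    simp only [Finset.mem_filter, Finset.mem_erase]
    constructor
    · rintro ⟨hx, hnx⟩
      refine ⟨fun hxy => hnx ((PySem.Set.mem_add visited key x).mpr (Or.inr hxy)),
        hx, fun hv => hnx ((PySem.Set.mem_add visited key x).mpr (Or.inl hv))⟩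
    · rintro ⟨hne, hx, hnx⟩
      refine ⟨hx, fun hmem' => ?_⟩
      rcases (PySem.Set.mem_add visited key x).mp hmem' with h | h
      · exact hnx h
      · exact hne h
  unfold pvU
  rw [hset, Finset.card_erase_of_mem hmem]
  have hpos : 0 < ((pvS grid k).filter (fun x => x ∉ visited)).card :=
    Finset.card_pos.mpr ⟨key, hmem⟩
  omega

lemma pvKey_mem_S (grid : List (List Int)) (k : Int) {p : Int × Int} {nd : Int}
    (h1 : 0 ≤ p.1) (h2 : p.1 < (grid.length : Int)) (h3 : 0 ≤ p.2)
    (h4 : p.2 < ((grid.headI).length : Int)) (h5 : 0 ≤ nd)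
    (h6 : nd ≤ (if k < 0 then 0 else k)) :
    ((p, nd) : PKey) ∈ pvS grid k := by
  simp only [pvS, Finset.mem_product, Finset.mem_Icc]
  exact ⟨⟨⟨h1, by omega⟩, h3, by omega⟩, h5, h6⟩

lemma pvS_bounds (grid : List (List Int)) (k : Int) {key : PKey} (h : key ∈ pvS grid k) :
    0 ≤ key.1.1 ∧ key.1.1 < (grid.length : Int) ∧ 0 ≤ key.1.2 ∧
      key.1.2 < ((grid.headI).length : Int) ∧ 0 ≤ key.2 ∧
      key.2 ≤ (if k < 0 then 0 else k) := by
  simp only [pvS, Finset.mem_product, Finset.mem_Icc] at h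
  omega

lemma pvInv_push (grid : List (List Int)) (k : Int) {pq : List PEntry}
    {visited : PySem.Set PKey} {dist : PySem.Dict PKey Int}
    (hinv : pvInv grid k pq visited dist) {key : PKey} (hkS : key ∈ pvS grid k) {nc : Int}
    (hlt : pvLtGetInf nc (dist.get? key) = true) :
    pvInv grid k (pq ++ [(nc, key)]) visited (dist.insert key nc) := by
  obtain ⟨h1, h2, h3, h4, h5⟩ := hinv
  refine ⟨?_, ?_, ?_, PySem.Dict.nodup_keys_insert dist key nc h4, h5⟩
  · intro en hen
    rcases List.mem_append.mp hen with hh | hh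
    · exact h1 en hh
    · simp only [List.mem_singleton] at hh; subst hh; exact hkS
  · intro en hen hnv
    rcases List.mem_append.mp hen with hh | hh
    · by_cases hek : en.2 = key
      · obtain ⟨d, hd, hdle⟩ := h2 en hh hnv
        rw [hek] at hd
        rw [hd] at hlt
        simp only [pvLtGetInf] at hlt
        have hnc : nc < d := of_decide_eq_true hlt
        refine ⟨nc, ?_, by omega⟩
        rw [hek]; exact PySem.Dict.get?_insert_self dist key nc
      · obtain ⟨d, hd, hdle⟩ := h2 en hh hnv
        exact ⟨d, by rw [PySem.Dict.get?_insert_of_ne dist nc hek]; exact hd, hdle⟩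
    · simp only [List.mem_singleton] at hh; subst hh
      exact ⟨nc, PySem.Dict.get?_insert_self dist key nc, le_refl _⟩
  · intro key' d hnv hget
    by_cases hk : key' = key
    · subst hk
      rw [PySem.Dict.get?_insert_self dist key' nc] at hget
      have : nc = d := Option.some.inj hget
      subst this
      exact List.mem_append.mpr (Or.inr (List.mem_singleton.mpr rfl))
    · rw [PySem.Dict.get?_insert_of_ne dist nc hk] at hget
      exact List.mem_append.mpr (Or.inl (h3 key' d hnv hget))

lemma pvRelax_step (grid : List (List Int)) (k c0 d0 : Int) (visited : PySem.Set PKey)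
    (hd0 : 0 ≤ d0 ∧ d0 ≤ (if k < 0 then 0 else k)) (nbr : Int × Int)
    (pq : List PEntry) (dist : PySem.Dict PKey Int) (hinv : pvInv grid k pq visited dist) :
    (pvRelaxA grid k c0 d0 visited (pq, dist) nbr).2
        = pvRelaxB grid k c0 d0 visited dist nbr ∧
      pvInv grid k (pvRelaxA grid k c0 d0 visited (pq, dist) nbr).1 visited
        (pvRelaxA grid k c0 d0 visited (pq, dist) nbr).2 ∧
      (pvRelaxA grid k c0 d0 visited (pq, dist) nbr).1.length ≤ pq.length + 1 := by
  by_cases hval : (0 ≤ nbr.1 ∧ nbr.1 < (grid.length : Int) ∧ 0 ≤ nbr.2 ∧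
      nbr.2 < ((grid.headI).length : Int))
  · have hv : pvIsValid grid nbr = true := by simp [pvIsValid, hval]
    by_cases hw : pvCell grid nbr.1 nbr.2 = 1
    · by_cases hdk : d0 < k
      · by_cases hvis : PySem.Set.contains visited (nbr, d0 + 1) = true
        · have hm : ((nbr, d0 + 1) : PKey) ∈ visited :=
            (PySem.Set.contains_iff visited (nbr, d0 + 1)).mp hvis
          have hA : pvRelaxA grid k c0 d0 visited (pq, dist) nbr = (pq, dist) := by
            simp [pvRelaxA, hv, hw, hdk, hm]
          have hB : pvRelaxB grid k c0 d0 visited dist nbr = dist := by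
            simp [pvRelaxB, hval, hw, hdk, hm]
          rw [hA, hB]
          exact ⟨rfl, hinv, by simp⟩
        · have hnm : ((nbr, d0 + 1) : PKey) ∉ visited :=
            fun hh => hvis ((PySem.Set.contains_iff visited (nbr, d0 + 1)).mpr hh)
          by_cases hlt : pvLtGetInf (c0 + 1) (dist.get? (nbr, d0 + 1)) = true
          · have hA : pvRelaxA grid k c0 d0 visited (pq, dist) nbr
                = (pq ++ [(c0 + 1, (nbr, d0 + 1))],
                   dist.insert (nbr, d0 + 1) (c0 + 1)) := by
              simp [pvRelaxA, hv, hw, hdk, hnm, hlt]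
            have hB : pvRelaxB grid k c0 d0 visited dist nbr
                = dist.insert (nbr, d0 + 1) (c0 + 1) := by
              simp [pvRelaxB, hval, hw, hdk, hnm, hlt]
            rw [hA, hB]
            refine ⟨rfl, ?_, by simp⟩
            exact pvInv_push grid k hinv
              (pvKey_mem_S grid k hval.1 hval.2.1 hval.2.2.1 hval.2.2.2 (by omega) (by omega))
              hlt
          · have hlt' : pvLtGetInf (c0 + 1) (dist.get? (nbr, d0 + 1)) = false := by
              cases hh : pvLtGetInf (c0 + 1) (dist.get? (nbr, d0 + 1))
              · rfl
              · exact absurd hh hlt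
            have hA : pvRelaxA grid k c0 d0 visited (pq, dist) nbr = (pq, dist) := by
              simp [pvRelaxA, hv, hw, hdk, hnm, hlt']
            have hB : pvRelaxB grid k c0 d0 visited dist nbr = dist := by
              simp [pvRelaxB, hval, hw, hdk, hnm, hlt']
            rw [hA, hB]
            exact ⟨rfl, hinv, by simp⟩
      · have hA : pvRelaxA grid k c0 d0 visited (pq, dist) nbr = (pq, dist) := by
          simp [pvRelaxA, hv, hw, hdk]
        have hB : pvRelaxB grid k c0 d0 visited dist nbr = dist := by
          simp [pvRelaxB, hval, hw, hdk]
        rw [hA, hB]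
        exact ⟨rfl, hinv, by simp⟩
    · by_cases hvis : PySem.Set.contains visited (nbr, d0) = true
      · have hm : ((nbr, d0) : PKey) ∈ visited :=
          (PySem.Set.contains_iff visited (nbr, d0)).mp hvis
        have hA : pvRelaxA grid k c0 d0 visited (pq, dist) nbr = (pq, dist) := by
          simp [pvRelaxA, hv, hw, hm]
        have hB : pvRelaxB grid k c0 d0 visited dist nbr = dist := by
          simp [pvRelaxB, hval, hw, hm]
        rw [hA, hB]
        exact ⟨rfl, hinv, by simp⟩
      · have hnm : ((nbr, d0) : PKey) ∉ visited :=
          fun hh => hvis ((PySem.Set.contains_iff visited (nbr, d0)).mpr hh)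
        by_cases hlt : pvLtGetInf (c0 + pvCell grid nbr.1 nbr.2)
            (dist.get? (nbr, d0)) = true
        · have hA : pvRelaxA grid k c0 d0 visited (pq, dist) nbr
              = (pq ++ [(c0 + pvCell grid nbr.1 nbr.2, (nbr, d0))],
                 dist.insert (nbr, d0) (c0 + pvCell grid nbr.1 nbr.2)) := by
            simp [pvRelaxA, hv, hw, hnm, hlt]
          have hB : pvRelaxB grid k c0 d0 visited dist nbr
              = dist.insert (nbr, d0) (c0 + pvCell grid nbr.1 nbr.2) := by
            simp [pvRelaxB, hval, hw, hnm, hlt]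
          rw [hA, hB]
          refine ⟨rfl, ?_, by simp⟩
          exact pvInv_push grid k hinv
            (pvKey_mem_S grid k hval.1 hval.2.1 hval.2.2.1 hval.2.2.2 hd0.1 hd0.2) hlt
        · have hlt' : pvLtGetInf (c0 + pvCell grid nbr.1 nbr.2)
              (dist.get? (nbr, d0)) = false := by
            cases hh : pvLtGetInf (c0 + pvCell grid nbr.1 nbr.2) (dist.get? (nbr, d0))
            · rfl
            · exact absurd hh hlt
          have hA : pvRelaxA grid k c0 d0 visited (pq, dist) nbr = (pq, dist) := by
            simp [pvRelaxA, hv, hw, hnm, hlt']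
          have hB : pvRelaxB grid k c0 d0 visited dist nbr = dist := by
            simp [pvRelaxB, hval, hw, hnm, hlt']
          rw [hA, hB]
          exact ⟨rfl, hinv, by simp⟩
  · have hv : pvIsValid grid nbr = false := by simp [pvIsValid, hval]
    have hA : pvRelaxA grid k c0 d0 visited (pq, dist) nbr = (pq, dist) := by
      simp [pvRelaxA, hv]
    have hB : pvRelaxB grid k c0 d0 visited dist nbr = dist := by
      simp [pvRelaxB, hval]
    rw [hA, hB]
    exact ⟨rfl, hinv, by simp⟩

lemma pvRelax_sim (grid : List (List Int)) (k c0 d0 : Int) (visited : PySem.Set PKey)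
    (hd0 : 0 ≤ d0 ∧ d0 ≤ (if k < 0 then 0 else k)) :
    ∀ (nbrs : List (Int × Int)) (pq : List PEntry) (dist : PySem.Dict PKey Int),
      pvInv grid k pq visited dist →
      ((nbrs.foldl (pvRelaxA grid k c0 d0 visited) (pq, dist)).2 =
          nbrs.foldl (pvRelaxB grid k c0 d0 visited) dist) ∧
      pvInv grid k (nbrs.foldl (pvRelaxA grid k c0 d0 visited) (pq, dist)).1 visited
        (nbrs.foldl (pvRelaxA grid k c0 d0 visited) (pq, dist)).2 ∧
      (nbrs.foldl (pvRelaxA grid k c0 d0 visited) (pq, dist)).1.length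
        ≤ pq.length + nbrs.length := by
  intro nbrs
  induction nbrs with
  | nil => intro pq dist hinv; exact ⟨rfl, hinv, by simp⟩
  | cons nbr rest ih =>
    intro pq dist hinv
    obtain ⟨heq, hinv1, hlen1⟩ := pvRelax_step grid k c0 d0 visited hd0 nbr pq dist hinv
    have hfoldA : (nbr :: rest).foldl (pvRelaxA grid k c0 d0 visited) (pq, dist)
        = rest.foldl (pvRelaxA grid k c0 d0 visited)
            (pvRelaxA grid k c0 d0 visited (pq, dist) nbr) := by
      simp [List.foldl_cons]
    have hfoldB : (nbr :: rest).foldl (pvRelaxB grid k c0 d0 visited) dist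
        = rest.foldl (pvRelaxB grid k c0 d0 visited)
            (pvRelaxB grid k c0 d0 visited dist nbr) := by
      simp [List.foldl_cons]
    obtain ⟨hq, hi, hl⟩ := ih (pvRelaxA grid k c0 d0 visited (pq, dist) nbr).1
      (pvRelaxA grid k c0 d0 visited (pq, dist) nbr).2 hinv1
    rw [hfoldA, hfoldB, ← heq]
    rw [Prod.mk.eta] at hq hi hl
    refine ⟨hq, hi, ?_⟩
    simp only [List.length_cons]
    omega

lemma pvLockstep (grid : List (List Int)) (k : Int) (e : Int × Int) :
    ∀ (fa fb : Nat) (pq : List PEntry) (visited : PySem.Set PKey)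
      (dist : PySem.Dict PKey Int),
      pvInv grid k pq visited dist →
      1 + pq.length + 5 * pvU grid k visited ≤ fa →
      1 + pvU grid k visited ≤ fb →
      pvLoopA grid k e fa pq visited dist = pvLoopB grid k e fb dist visited := by
  intro fa
  induction fa with
  | zero => intro fb pq visited dist _ hfa _; omega
  | succ fa ih =>
    intro fb pq visited dist hinv hfa hfb
    obtain ⟨h1, h2, h3, h4, h5⟩ := hinv
    obtain ⟨fb', rfl⟩ : ∃ fb', fb = fb' + 1 := ⟨fb - 1, by omega⟩
    cases pq with
    | nil =>
      have hnone : dist.items.foldl (pvBestStep visited) none = none := by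
        cases heq : dist.items.foldl (pvBestStep visited) none with
        | none => rfl
        | some b =>
          exfalso
          obtain ⟨_, _, hmem⟩ := (pvBest_go visited dist.items none).2 b heq
          rcases hmem with hbad | hbm
          · cases hbad
          · obtain ⟨hitems, hcont⟩ := mem_pvCands.mp hbm
            have hget : dist.get? b.2 = some b.1 :=
              PySem.Dict.get?_of_mem_items dist hitems h4
            have hnv : b.2 ∉ visited := by
              intro hm2
              rw [(PySem.Set.contains_iff visited b.2).mpr hm2] at hcont
              cases hcont
            exact absurd (h3 b.2 b.1 hnv hget) List.not_mem_nil
      simp [pvLoopA, pvLoopB, hnone]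
    | cons h t =>
      have hmmem : pvMinE h t ∈ h :: t := pvMinE_mem h t
      have hmmin : ∀ x ∈ h :: t, eLe (pvMinE h t) x = true := pvMinE_min h t
      have hlen' : ((h :: t).erase (pvMinE h t)).length = t.length := by
        rw [List.length_erase_of_mem hmmem]; simp
      by_cases hvm : PySem.Set.contains visited (pvMinE h t).2 = true
      · have hstep : pvLoopA grid k e (fa + 1) (h :: t) visited dist
            = pvLoopA grid k e fa ((h :: t).erase (pvMinE h t)) visited dist := by
          simp only [pvLoopA]
          rw [if_pos hvm]
        rw [hstep]
        apply ih
        · refine ⟨fun en hen => h1 en (List.mem_of_mem_erase hen),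
            fun en hen hnv => h2 en (List.mem_of_mem_erase hen) hnv, ?_, h4, h5⟩
          intro key d hnv hget
          have hne : (d, key) ≠ pvMinE h t := by
            intro hcontra
            apply hnv
            have hk2 : key = (pvMinE h t).2 := by rw [← hcontra]
            rw [hk2]
            exact (PySem.Set.contains_iff visited (pvMinE h t).2).mp hvm
          exact (List.mem_erase_of_ne hne).mpr (h3 key d hnv hget)
        · rw [hlen']
          simp only [List.length_cons] at hfa
          omega
        · omega
      · have hnvm : (pvMinE h t).2 ∉ visited := fun hm2 =>
          hvm ((PySem.Set.contains_iff visited (pvMinE h t).2).mpr hm2)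
        have hvm' : PySem.Set.contains visited (pvMinE h t).2 = false := by
          cases hh : PySem.Set.contains visited (pvMinE h t).2
          · rfl
          · exact absurd hh hvm
        obtain ⟨d, hget0, hdle⟩ := h2 (pvMinE h t) hmmem hnvm
        have hdm : (d, (pvMinE h t).2) ∈ h :: t := h3 (pvMinE h t).2 d hnvm hget0
        have hmd : (pvMinE h t).1 ≤ d := by
          have hled : eLe ((pvMinE h t).1, (pvMinE h t).2) (d, (pvMinE h t).2) = true := by
            rw [Prod.mk.eta]; exact hmmin _ hdm
          exact eLe_same_key hled
        have hdm1 : d = (pvMinE h t).1 := le_antisymm hdle hmd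
        rw [hdm1] at hget0
        have hmcand : (((pvMinE h t).1, (pvMinE h t).2) : PEntry)
            ∈ pvCands visited dist.items := by
          apply mem_pvCands.mpr
          exact ⟨PySem.Dict.mem_items_of_get?_eq_some dist hget0, hvm'⟩
        have hbest : dist.items.foldl (pvBestStep visited) none = some (pvMinE h t) := by
          cases heq : dist.items.foldl (pvBestStep visited) none with
          | none =>
            exfalso
            have hcands := (pvBest_go visited dist.items none).1 heq
            rw [hcands.2] at hmcand
            exact absurd hmcand List.not_mem_nil
          | some b =>
            obtain ⟨hall, _, hmem⟩ := (pvBest_go visited dist.items none).2 b heq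
            have h1b : eLe b ((pvMinE h t).1, (pvMinE h t).2) = true := hall _ hmcand
            rcases hmem with hbad | hbm
            · cases hbad
            · obtain ⟨hitems, hcont⟩ := mem_pvCands.mp hbm
              have hgetb : dist.get? b.2 = some b.1 :=
                PySem.Dict.get?_of_mem_items dist hitems h4
              have hnvb : b.2 ∉ visited := by
                intro hm2
                rw [(PySem.Set.contains_iff visited b.2).mpr hm2] at hcont
                cases hcont
              have hbpq : ((b.1, b.2) : PEntry) ∈ h :: t := h3 b.2 b.1 hnvb hgetb
              have h2b : eLe ((pvMinE h t).1, (pvMinE h t).2) (b.1, b.2) = true := by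
                rw [Prod.mk.eta]; exact hmmin _ hbpq
              have h1b' : eLe (b.1, b.2) ((pvMinE h t).1, (pvMinE h t).2) = true := by
                rw [Prod.mk.eta]; exact h1b
              have hbm2 : ((b.1, b.2) : PEntry) = ((pvMinE h t).1, (pvMinE h t).2) :=
                eLe_antisymm h1b' h2b
              rw [Prod.mk.eta, Prod.mk.eta] at hbm2
              rw [hbm2]
        have hdistsame : dist.insert (pvMinE h t).2 (pvMinE h t).1 = dist :=
          pvInsert_same h4 hget0
        by_cases he : (pvMinE h t).2.1 = e
        · have hA : pvLoopA grid k e (fa + 1) (h :: t) visited dist = (pvMinE h t).1 := by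
            simp only [pvLoopA]
            rw [if_neg (by rw [hvm']; exact Bool.false_ne_true), if_pos he]
          have hB : pvLoopB grid k e (fb' + 1) dist visited = (pvMinE h t).1 := by
            simp only [pvLoopB]
            rw [hbest]
            simp only [if_pos he]
          rw [hA, hB]
        · have hinv' : pvInv grid k ((h :: t).erase (pvMinE h t))
              (PySem.Set.add visited (pvMinE h t).2) dist := by
            refine ⟨fun en hen => h1 en (List.mem_of_mem_erase hen), ?_, ?_, h4,
              PySem.Set.nodup_add visited (pvMinE h t).2 h5⟩
            · intro en hen hnv
              apply h2 en (List.mem_of_mem_erase hen)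
              intro hm2
              exact hnv ((PySem.Set.mem_add visited (pvMinE h t).2 en.2).mpr (Or.inl hm2))
            · intro key dd hnv hget
              have hkv : key ∉ visited :=
                fun hh => hnv ((PySem.Set.mem_add visited (pvMinE h t).2 key).mpr (Or.inl hh))
              have hkm : key ≠ (pvMinE h t).2 :=
                fun hh => hnv ((PySem.Set.mem_add visited (pvMinE h t).2 key).mpr (Or.inr hh))
              have hne : (dd, key) ≠ pvMinE h t := fun hc => hkm (by rw [← hc])
              exact (List.mem_erase_of_ne hne).mpr (h3 key dd hkv hget)
          have hd0 : 0 ≤ (pvMinE h t).2.2 ∧ (pvMinE h t).2.2 ≤ (if k < 0 then 0 else k) := by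
            have hb := pvS_bounds grid k (h1 (pvMinE h t) hmmem)
            exact ⟨hb.2.2.2.2.1, hb.2.2.2.2.2⟩
          obtain ⟨hq, hinvr, hlenr⟩ := pvRelax_sim grid k (pvMinE h t).1 (pvMinE h t).2.2
            (PySem.Set.add visited (pvMinE h t).2) hd0 (pvNbrs (pvMinE h t).2.1)
            ((h :: t).erase (pvMinE h t)) dist hinv'
          obtain ⟨hUadd, hUpos⟩ := pvU_add grid k (h1 (pvMinE h t) hmmem) hnvm
          have hlen4 : (pvNbrs (pvMinE h t).2.1).length = 4 := rfl
          have hrec := ih fb'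
            ((pvNbrs (pvMinE h t).2.1).foldl
              (pvRelaxA grid k (pvMinE h t).1 (pvMinE h t).2.2
                (PySem.Set.add visited (pvMinE h t).2))
              ((h :: t).erase (pvMinE h t), dist)).1
            (PySem.Set.add visited (pvMinE h t).2)
            ((pvNbrs (pvMinE h t).2.1).foldl
              (pvRelaxA grid k (pvMinE h t).1 (pvMinE h t).2.2
                (PySem.Set.add visited (pvMinE h t).2))
              ((h :: t).erase (pvMinE h t), dist)).2
            hinvr
            (by
              simp only [List.length_cons] at hfa
              omega)
            (by omega)
          have hA : pvLoopA grid k e (fa + 1) (h :: t) visited dist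
              = pvLoopA grid k e fa
                  ((pvNbrs (pvMinE h t).2.1).foldl
                    (pvRelaxA grid k (pvMinE h t).1 (pvMinE h t).2.2
                      (PySem.Set.add visited (pvMinE h t).2))
                    ((h :: t).erase (pvMinE h t), dist)).1
                  (PySem.Set.add visited (pvMinE h t).2)
                  ((pvNbrs (pvMinE h t).2.1).foldl
                    (pvRelaxA grid k (pvMinE h t).1 (pvMinE h t).2.2
                      (PySem.Set.add visited (pvMinE h t).2))
                    ((h :: t).erase (pvMinE h t), dist)).2 := by
            simp only [pvLoopA]
            rw [if_neg (by rw [hvm']; exact Bool.false_ne_true), if_neg he, hdistsame]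
          have hB : pvLoopB grid k e (fb' + 1) dist visited
              = pvLoopB grid k e fb'
                  ((pvNbrs (pvMinE h t).2.1).foldl
                    (pvRelaxB grid k (pvMinE h t).1 (pvMinE h t).2.2
                      (PySem.Set.add visited (pvMinE h t).2)) dist)
                  (PySem.Set.add visited (pvMinE h t).2) := by
            simp only [pvLoopB]
            rw [hbest]
            simp only [if_neg he]
            rfl
          rw [hA, hB, ← hq]
          exact hrec

-- ===== VERDICT (by name: the statement is the Claim_ definition above) =====
theorem shoot_obstacle_spec : Claim_equal_shoot_obstacle := by
  unfold Claim_equal_shoot_obstacle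
  intro grid k _ hpre
  obtain ⟨hne, hcols, _⟩ := hpre
  unfold Spec_shoot_obstacle
  have hlen : 0 < grid.length := List.length_pos_of_ne_nil hne
  have hU : pvU grid k PySem.Set.empty
      = grid.length * (grid.headI).length * (k.toNat + 1) := by
    unfold pvU
    have hall : ∀ x ∈ pvS grid k, x ∉ PySem.Set.empty := fun x _ => List.not_mem_nil
    rw [Finset.filter_true_of_mem hall, pvCard_S]
  have hkey0 : ((((0 : Int), (0 : Int)), (0 : Int)) : PKey) ∈ pvS grid k :=
    pvKey_mem_S grid k (p := ((0 : Int), (0 : Int))) (nd := (0 : Int))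
      (by exact le_refl 0) (by show (0:Int) < _; exact_mod_cast hlen) (by exact le_refl 0)
      (by show (0:Int) < _; exact_mod_cast hcols) (by exact le_refl 0) (by split_ifs <;> omega)
  have hget0 : (PySem.Dict.ofList
        [(((((0 : Int), (0 : Int))), (0 : Int)), pvCell grid 0 0)]).get?
        (((0 : Int), (0 : Int)), (0 : Int)) = some (pvCell grid 0 0) := rfl
  have hinv : pvInv grid k [(pvCell grid 0 0, (((0 : Int), (0 : Int)), (0 : Int)))]
      PySem.Set.empty
      (PySem.Dict.ofList [(((((0 : Int), (0 : Int))), (0 : Int)), pvCell grid 0 0)]) := by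
    refine ⟨?_, ?_, ?_, ?_, List.nodup_nil⟩
    · intro en hen
      simp only [List.mem_singleton] at hen
      subst hen
      exact hkey0
    · intro en hen _
      simp only [List.mem_singleton] at hen
      subst hen
      exact ⟨pvCell grid 0 0, hget0, le_refl _⟩
    · intro key dd _ hget
      by_cases hk : ((((0 : Int), (0 : Int)), (0 : Int)) : PKey) = key
      · rw [← hk] at hget
        rw [hget0] at hget
        have : pvCell grid 0 0 = dd := Option.some.inj hget
        subst this
        rw [← hk]
        exact List.mem_singleton.mpr rfl
      · exfalso
        rw [show (PySem.Dict.ofList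
              [(((((0 : Int), (0 : Int))), (0 : Int)), pvCell grid 0 0)])
            = PySem.Dict.mk [(((((0 : Int), (0 : Int))), (0 : Int)), pvCell grid 0 0)]
            from rfl] at hget
        rw [PySem.Dict.get?_mk_cons] at hget
        rw [if_neg (by simpa using hk)] at hget
        have : (PySem.Dict.mk ([] : List (PKey × Int))).get? key = none := rfl
        rw [this] at hget
        cases hget
    · have : (PySem.Dict.ofList
          [(((((0 : Int), (0 : Int))), (0 : Int)), pvCell grid 0 0)]).keys
          = [((((0 : Int), (0 : Int)), (0 : Int)) : PKey)] := rfl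
      rw [this]
      exact List.nodup_singleton _
  have hmain := pvLockstep grid k ((grid.length : Int) - 1, ((grid.headI).length : Int) - 1)
    (5 * (grid.length * (grid.headI).length * (k.toNat + 1)) + 2)
    (grid.length * (grid.headI).length * (k.toNat + 1) + 1)
    [(pvCell grid 0 0, (((0 : Int), (0 : Int)), (0 : Int)))]
    PySem.Set.empty
    (PySem.Dict.ofList [(((((0 : Int), (0 : Int))), (0 : Int)), pvCell grid 0 0)])
    hinv
    (by simp only [List.length_singleton]; rw [hU]; omega)
    (by rw [hU]; omega)
  exact hmain
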